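-- pv_equiv track=rewrite | github.com/erikseulean/python-algo | Problems/min_sorting_sequence.py | start_sort
-- ===== SOURCE A (Python) =====
-- def start_sort(array):
--     index = 1
--
--     while index < len(array) and array[index] > array[index-1]:
--         index += 1
--     start = index - 1
--     min_nr = 9999999
--     for j in range(index, len(array)):
--         min_nr = min(min_nr, array[j])
--     while start > 0 and array[start-1] > min_nr:
--         start -= 1
--
--     return start
-- ===== SOURCE B (Python) =====
-- import bisect
--
--
-- def start_sort(array):
--     index = 1
--     while index < len(array) and array[index] > array[index - 1]:
--         index += 1
--     min_nr = min([9999999] + array[index:])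
--     return bisect.bisect_right(array[:index - 1], min_nr)
-- ===== Notes on version B (the rewrite author's own statement) =====
-- stated objective: alternative
-- what changed: Phase 2's running-min for-loop becomes a single min() over the suffix (with the same 9999999 sentinel floor), and phase 3's linear leftward while-loop over the strictly increasing prefix becomes a bisect_right binary search on that prefix; both replaced phases run in C instead of the interpreter.
import Mathlib
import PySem

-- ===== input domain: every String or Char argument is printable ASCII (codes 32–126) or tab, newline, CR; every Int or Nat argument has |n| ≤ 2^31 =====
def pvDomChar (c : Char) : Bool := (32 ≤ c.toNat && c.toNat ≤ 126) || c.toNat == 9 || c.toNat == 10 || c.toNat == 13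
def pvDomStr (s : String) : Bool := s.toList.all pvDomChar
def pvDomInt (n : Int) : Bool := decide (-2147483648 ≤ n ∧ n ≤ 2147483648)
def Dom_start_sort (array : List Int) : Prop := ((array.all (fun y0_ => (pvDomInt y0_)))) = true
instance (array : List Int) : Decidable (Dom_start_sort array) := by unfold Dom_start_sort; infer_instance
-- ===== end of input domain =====

-- B replaces A's backward linear scan by a bisect_right binary search over the
-- strictly increasing prefix (and the running-min loop by one min() call): an
-- alternative decomposition of the same task, same return value on every input.


-- ===== PORT A =====
-- while index < len(array) and array[index] > array[index-1]: index += 1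
-- (fuel = array.length is enough: the loop stops once index reaches len(array));
-- array[index], array[index-1] are always in range when read, so getD is exact
def startSortScanA (a : List Int) : Nat → Nat → Nat
  | 0, index => index
  | fuel + 1, index =>
    if index < a.length ∧ a.getD (index - 1) 0 < a.getD index 0 then
      startSortScanA a fuel (index + 1)
    else index

-- while start > 0 and array[start-1] > min_nr: start -= 1
def startSortBackA (a : List Int) (min_nr : Int) : Nat → Nat
  | 0 => 0
  | start + 1 => if min_nr < a.getD start 0 then startSortBackA a min_nr start else start + 1

def start_sort (array : List Int) : Int :=
  let index := startSortScanA array array.length 1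
  let start := index - 1
  -- for j in range(index, len(array)): min_nr = min(min_nr, array[j])
  let min_nr := (array.drop index).foldl min 9999999
  ((startSortBackA array min_nr start : Nat) : Int)

-- ===== PORT B =====
-- same phase-1 while loop as Source B (it is Source B's code too)
def startSortScanB (a : List Int) : Nat → Nat → Nat
  | 0, index => index
  | fuel + 1, index =>
    if index < a.length ∧ a.getD (index - 1) 0 < a.getD index 0 then
      startSortScanB a fuel (index + 1)
    else index

def start_sort_alt (array : List Int) : Int :=
  let index := startSortScanB array array.length 1
  -- min([9999999] + array[index:]) : the list is nonempty, so min? is some; getD is exact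
  let min_nr := (PySem.List.min? ((9999999 : Int) :: array.drop index) (fun y => y)).getD 0
  -- bisect.bisect_right(array[:index-1], min_nr)
  ((PySem.List.bisectRight (array.take (index - 1)) min_nr : Nat) : Int)

-- ===== PRECONDITION & SPEC =====
def Spec_start_sort (array : List Int) (out : Int) : Prop := out = start_sort_alt array
instance (array : List Int) (out : Int) : Decidable (Spec_start_sort array out) := by unfold Spec_start_sort; infer_instance

-- ===== CLAIM (what is proved, stated in full; the proofs are below) =====
def Claim_equal_start_sort : Prop := ∀ (array : List Int), Dom_start_sort array → Spec_start_sort array (start_sort array)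

-- ===== LEMMAS AND PROOFS =====

theorem scanB_eq_scanA (a : List Int) (fuel i : Nat) :
    startSortScanB a fuel i = startSortScanA a fuel i := by
  induction fuel generalizing i with
  | zero => rfl
  | succ f ih =>
    simp only [startSortScanA, startSortScanB]
    split_ifs with h
    · exact ih (i + 1)
    · rfl

theorem scanA_le (a : List Int) (fuel i : Nat) :
    startSortScanA a fuel i ≤ max i a.length := by
  induction fuel generalizing i with
  | zero => simp [startSortScanA]
  | succ f ih =>
    simp only [startSortScanA]
    split_ifs with h
    · have := ih (i + 1)
      omega
    · omega

theorem scanA_ge (a : List Int) (fuel i : Nat) : i ≤ startSortScanA a fuel i := by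
  induction fuel generalizing i with
  | zero => simp [startSortScanA]
  | succ f ih =>
    simp only [startSortScanA]
    split_ifs with h
    · have := ih (i + 1); omega
    · omega

-- the scanned prefix is strictly increasing step by step
theorem scanA_chain (a : List Int) (fuel i : Nat)
    (hinv : ∀ k, 1 ≤ k → k < i → a.getD (k - 1) 0 < a.getD k 0) :
    ∀ k, 1 ≤ k → k < startSortScanA a fuel i → a.getD (k - 1) 0 < a.getD k 0 := by
  induction fuel generalizing i with
  | zero => simpa [startSortScanA] using hinv
  | succ f ih =>
    simp only [startSortScanA]
    split_ifs with h
    · refine ih (i + 1) ?_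
      intro k hk1 hk
      rcases Nat.lt_or_ge k i with hlt | hge
      · exact hinv k hk1 hlt
      · have : k = i := by omega
        subst this
        exact h.2
    · exact hinv

-- adjacent strict increase gives strict monotonicity of getD on the prefix
theorem chain_mono (a : List Int) (n : Nat)
    (h : ∀ k, 1 ≤ k → k < n → a.getD (k - 1) 0 < a.getD k 0) :
    ∀ j k, j < k → k < n → a.getD j 0 < a.getD k 0 := by
  intro j k hjk hkn
  induction k with
  | zero => omega
  | succ k ih =>
    have hstep : a.getD k 0 < a.getD (k + 1) 0 := by
      have := h (k + 1) (by omega) hkn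
      simpa using this
    rcases Nat.lt_or_ge j k with hlt | hge
    · exact lt_trans (ih hlt (by omega)) hstep
    · have : j = k := by omega
      subst this
      exact hstep

theorem backA_le (a : List Int) (m : Int) (s : Nat) : startSortBackA a m s ≤ s := by
  induction s with
  | zero => simp [startSortBackA]
  | succ s ih =>
    simp only [startSortBackA]
    split_ifs with h
    · omega
    · omega

-- every position at or beyond the loop's result (below s) holds a value > m
theorem backA_hi (a : List Int) (m : Int) (s : Nat) :
    ∀ j, startSortBackA a m s ≤ j → j < s → m < a.getD j 0 := by
  induction s with
  | zero => intro j _ h; omega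
  | succ s ih =>
    intro j hj hjs
    simp only [startSortBackA] at hj
    split_ifs at hj with h
    · rcases Nat.lt_or_ge j s with hlt | hge
      · exact ih j hj hlt
      · have : j = s := by omega
        subst this
        exact h
    · omega

-- with a monotone prefix, every position below the result holds a value ≤ m
theorem backA_lo (a : List Int) (m : Int) (s : Nat)
    (hmono : ∀ j k, j < k → k < s → a.getD j 0 ≤ a.getD k 0) :
    ∀ j, j < startSortBackA a m s → a.getD j 0 ≤ m := by
  induction s with
  | zero => intro j hj; simp [startSortBackA] at hj
  | succ s ih =>
    intro j hj
    simp only [startSortBackA] at hj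
    split_ifs at hj with h
    · exact ih (fun j k hjk hks => hmono j k hjk (by omega)) j hj
    · push Not at h
      rcases Nat.lt_or_ge j s with hlt | hge
      · exact le_trans (hmono j s hlt (by omega)) h
      · have : j = s := by omega
        subst this
        exact h

-- the backward while loop equals bisect_right on the (sorted) truncated prefix
theorem backA_eq_bisect (a : List Int) (m : Int) (s : Nat) (hs : s ≤ a.length)
    (hmono : ∀ j k, j < k → k < s → a.getD j 0 ≤ a.getD k 0) :
    startSortBackA a m s = PySem.List.bisectRight (a.take s) m := by
  have hlen : (a.take s).length = s := by simp [List.length_take, hs]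
  have hsorted : (a.take s).Pairwise (fun x1 x2 => x1 ≤ x2) := by
    rw [List.pairwise_iff_getElem]
    intro i j hi hj hij
    have hi' : i < a.length := by omega
    have hj' : j < a.length := by omega
    have := hmono i j hij (by omega)
    simpa [List.getElem_take, List.getD_eq_getElem, hi', hj'] using this
  obtain ⟨hble, hblo, hbhi⟩ := PySem.List.bisectRight_spec (a.take s) m hsorted
  set b := PySem.List.bisectRight (a.take s) m with hb
  set r := startSortBackA a m s with hr
  have hrle : r ≤ s := backA_le a m s
  have hget : ∀ j (hj : j < s), (a.take s)[j]'(by omega) = a.getD j 0 := by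
    intro j hj
    have : j < a.length := by omega
    simp [List.getElem_take, this]
  rcases Nat.lt_trichotomy r b with hlt | heq | hgt
  · -- r < b ≤ s : a[r] ≤ m from bisect, m < a[r] from the loop
    have hrs : r < s := by omega
    have h1 : (a.take s)[r]'(by omega) ≤ m := hblo r (by omega) hlt
    have h2 : m < a.getD r 0 := backA_hi a m s r le_rfl hrs
    rw [hget r hrs] at h1
    omega
  · exact heq
  · -- b < r ≤ s : m < a[b] from bisect, a[b] ≤ m from the loop
    have hbs : b < s := by omega
    have h1 : m < (a.take s)[b]'(by omega) := hbhi b (by omega) le_rfl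
    have h2 : a.getD b 0 ≤ m := backA_lo a m s hmono b hgt
    rw [hget b hbs] at h1
    omega

-- ===== VERDICT (by name: the statement is the Claim_ definition above) =====
theorem start_sort_spec : Claim_equal_start_sort := by
  unfold Claim_equal_start_sort
  intro array _
  unfold Spec_start_sort
  -- unfold both ports; the two phase-1 scans and the two min_nr computations agree
  simp only [start_sort, start_sort_alt, scanB_eq_scanA, PySem.List.min?_id_cons,
    Option.getD_some]
  set ix := startSortScanA array array.length 1 with hix
  set m := (array.drop ix).foldl min (9999999 : Int) with hm
  -- bounds on ix
  have hle : ix ≤ max 1 array.length := scanA_le array array.length 1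
  have hge : 1 ≤ ix := scanA_ge array array.length 1
  have hs : ix - 1 ≤ array.length := by
    rcases Nat.eq_zero_or_pos array.length with h0 | h0 <;> omega
  have hchain := scanA_chain array array.length 1 (by intro k hk1 hk; omega)
  have hmono : ∀ j k, j < k → k < ix - 1 → array.getD j 0 ≤ array.getD k 0 := by
    intro j k hjk hk
    exact le_of_lt (chain_mono array ix hchain j k hjk (by omega))
  exact congrArg Int.ofNat (backA_eq_bisect array m (ix - 1) hs hmono)
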